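-- pv_equiv track=rewrite | github.com/981377660LMT/algorithm-study | 11_动态规划/子数组/2393. 严格递增的子数组个数.py | countSubarrays
-- ===== SOURCE A (Python) =====
-- from typing import List
--
-- def countSubarrays(nums: List[int]) -> int:
--     n, dp, res = len(nums), 0, 0
--     for i in range(n):  # 以每个位置为右端点的子数组个数
--         if i - 1 < 0 or nums[i - 1] < nums[i]:
--             dp += 1
--         else:
--             dp = 1
--         res += dp
--     return res
-- ===== SOURCE B (Python) =====
-- def countSubarrays(nums):
--     # Decompose into maximal strictly increasing runs; a completed run of
--     # length L contributes L*(L+1)//2 strictly increasing subarrays.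
--     if not nums:
--         return 0
--     res = 0
--     run = 1
--     prev = nums[0]
--     for x in nums[1:]:
--         if prev < x:
--             run += 1
--         else:
--             res += run * (run + 1) // 2
--             run = 1
--         prev = x
--     return res + run * (run + 1) // 2
-- ===== Notes on version B (the rewrite author's own statement) =====
-- stated objective: alternative
-- what changed: Replaces the per-index DP accumulation (res += dp at every position) with a decomposition into maximal strictly increasing runs, adding the closed-form L*(L+1)//2 per completed run.
import Mathlib
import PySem

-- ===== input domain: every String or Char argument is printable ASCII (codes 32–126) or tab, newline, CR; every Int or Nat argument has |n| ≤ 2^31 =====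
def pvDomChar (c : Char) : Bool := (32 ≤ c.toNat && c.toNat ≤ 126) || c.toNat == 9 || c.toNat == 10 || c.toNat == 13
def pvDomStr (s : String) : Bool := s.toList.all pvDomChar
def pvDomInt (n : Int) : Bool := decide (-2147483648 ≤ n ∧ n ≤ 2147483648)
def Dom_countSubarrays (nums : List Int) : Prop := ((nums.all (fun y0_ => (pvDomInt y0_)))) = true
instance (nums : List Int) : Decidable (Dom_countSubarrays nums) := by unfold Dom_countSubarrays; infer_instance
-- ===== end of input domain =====

-- B replaces A's per-index DP accumulation by a decomposition into maximal strictly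
-- increasing runs, each counted with the closed form L*(L+1)//2 (objective: alternative).

-- ===== PORT A =====
-- literal port of A: fold over range(n) with state (dp, res); nums[i-1]/nums[i] via
-- pyGetD (indices are always in range where Python reads them, so the default is dead)
def countSubarrays (nums : List Int) : Int :=
  ((PySem.List.pyRange 0 (nums.length : Int) 1).foldl
    (fun (st : Int × Int) i =>
      let dp :=
        if i - 1 < 0 ∨ PySem.List.pyGetD nums (i - 1) 0 < PySem.List.pyGetD nums i 0
        then st.1 + 1
        else 1
      (dp, st.2 + dp))
    (0, 0)).2

-- ===== PORT B =====
-- B-side helper: the loop of Source B over nums[1:] with state (prev, run, res)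
def altGo : List Int → Int → Int → Int → Int
  | [], _, run, res => res + PySem.Int.floordiv (run * (run + 1)) 2
  | y :: ys, prev, run, res =>
      if prev < y then altGo ys y (run + 1) res
      else altGo ys y 1 (res + PySem.Int.floordiv (run * (run + 1)) 2)

def countSubarrays_alt : List Int → Int
  | [] => 0
  | x :: xs => altGo xs x 1 0

-- ===== PRECONDITION & SPEC =====
def Spec_countSubarrays (nums : List Int) (out : Int) : Prop := out = countSubarrays_alt nums
instance (nums : List Int) (out : Int) : Decidable (Spec_countSubarrays nums out) := by unfold Spec_countSubarrays; infer_instance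

-- ===== CLAIM (what is proved, stated in full; the proofs are below) =====
def Claim_equal_countSubarrays : Prop := ∀ (nums : List Int), Dom_countSubarrays nums → Spec_countSubarrays nums (countSubarrays nums)

-- ===== LEMMAS AND PROOFS =====

-- proof-side recursive form of A's loop: state (prev, dp, res) over the suffix
def aGo : List Int → Int → Int → Int → Int
  | [], _, _, res => res
  | y :: ys, prev, dp, res =>
      let dp' := if prev < y then dp + 1 else 1
      aGo ys y dp' (res + dp')

-- the triangle number A accumulates over one run
def tri (k : Int) : Int := PySem.Int.floordiv (k * (k + 1)) 2

lemma tri_succ (k : Int) : tri (k + 1) = tri k + (k + 1) := by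
  obtain ⟨d, hd⟩ := Int.even_mul_succ_self k
  have h1 : k * (k + 1) = 2 * d := by omega
  have h2 : (k + 1) * (k + 1 + 1) = 2 * (d + (k + 1)) := by nlinarith
  simp [tri, h1, h2, Int.mul_ediv_cancel_left _ (by omega : (2 : Int) ≠ 0)]

-- A's running DP sum equals B's completed-runs sum plus the current run's triangle
lemma aGo_eq_altGo : ∀ (ys : List Int) (prev run res : Int),
    aGo ys prev run (res + tri run) = altGo ys prev run res := by
  intro ys
  induction ys with
  | nil => intro prev run res; simp [aGo, altGo, tri]
  | cons y ys ih =>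
    intro prev run res
    by_cases h : prev < y
    · have : res + tri run + (run + 1) = res + tri (run + 1) := by rw [tri_succ]; ring
      simp [aGo, altGo, h, this, ih]
    · have h1 : res + tri run + 1 = (res + tri run) + tri 1 := by norm_num [tri]
      simp only [aGo, altGo, if_neg h]
      rw [h1, ih]
      rfl

-- A's index fold over the remaining positions computes aGo on the remaining suffix
lemma foldA : ∀ (l2 l1 : List Int) (prev dp res : Int),
    ((PySem.List.pyRange ((l1.length : Int) + 1) (((l1 ++ prev :: l2).length : Int)) 1).foldl
      (fun (st : Int × Int) i =>
        let dp :=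
          if i - 1 < 0 ∨ PySem.List.pyGetD (l1 ++ prev :: l2) (i - 1) 0
              < PySem.List.pyGetD (l1 ++ prev :: l2) i 0
          then st.1 + 1
          else 1
        (dp, st.2 + dp)) (dp, res)).2 = aGo l2 prev dp res := by
  intro l2
  induction l2 with
  | nil =>
    intro l1 prev dp res
    rw [PySem.List.pyRange_one_eq_nil (by simp only [List.length_append, List.length_cons, List.length_nil]; push_cast; omega)]
    simp [aGo]
  | cons y ys ih =>
    intro l1 prev dp res
    have hlen : (((l1 ++ prev :: y :: ys).length : Int)) = (l1.length : Int) + 2 + ys.length := by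
      simp; omega
    rw [PySem.List.pyRange_one_cons (by omega : ((l1.length : Int) + 1) < _)]
    have hprev : PySem.List.pyGetD (l1 ++ prev :: y :: ys) ((l1.length : Int) + 1 - 1) 0 = prev := by
      have : ((l1.length : Int) + 1 - 1) = ((l1.length : Nat) : Int) := by omega
      rw [this, PySem.List.pyGetD_natCast]
      simp [List.getD]
    have hy : PySem.List.pyGetD (l1 ++ prev :: y :: ys) ((l1.length : Int) + 1) 0 = y := by
      have : ((l1.length : Int) + 1) = ((l1.length + 1 : Nat) : Int) := by omega
      rw [this, PySem.List.pyGetD_natCast]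
      simp [List.getD]
    have hnn : ¬ ((l1.length : Int) + 1 - 1 < 0) := by omega
    have hassoc : l1 ++ prev :: y :: ys = (l1 ++ [prev]) ++ y :: ys := by simp
    have hidx : (l1.length : Int) + 1 + 1 = (((l1 ++ [prev]).length : Nat) : Int) + 1 := by
      simp
    by_cases h : prev < y
    · simp only [List.foldl_cons, hprev, hy, hnn, h, or_true, if_true]
      rw [hassoc, hidx, ih]
      simp [aGo, h]
    · simp only [List.foldl_cons, hprev, hy, hnn, h, or_false, if_false]
      rw [hassoc, hidx, ih]
      simp [aGo, h]

-- ===== VERDICT (by name: the statement is the Claim_ definition above) =====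
theorem countSubarrays_spec : Claim_equal_countSubarrays := by
  intro nums _
  unfold Spec_countSubarrays countSubarrays countSubarrays_alt
  match nums with
  | [] => rfl
  | x :: xs =>
    have h0 : (0 : Int) < ((x :: xs).length : Int) := by simp
    rw [PySem.List.pyRange_one_cons h0]
    simp only [List.foldl_cons]
    have hbr : ((0 : Int) - 1 < 0) = True := by simp
    simp only [hbr, true_or, if_true, zero_add]
    have := foldA xs [] x (0 + 1) (0 + (0 + 1))
    simp only [List.nil_append, List.length_nil, Nat.cast_zero, zero_add] at this
    exact this.trans (aGo_eq_altGo xs x 1 0)
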